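-- pv_equiv track=rewrite | github.com/MrBrantCode/unitest_baseline | mut_generate/mist_train_cf/cf_83720/solution.py | validate_ean_codes
-- ===== SOURCE A (Python) =====
-- def validate_ean_codes(ean_codes):
--     def validate_ean(ean):
--         if len(ean) != 13:
--             return "Invalid (Length is not equal to 13 characters)"
--         if not ean.isdigit():
--             return "Invalid (Contains non-digit characters)"
--
--         odds = sum(int(ean[i]) for i in range(0, 12, 2))
--         evens = sum(int(ean[i]) for i in range(1, 12, 2))
--         check_digit = (10 - (odds + evens * 3) % 10) % 10
--         if check_digit == int(ean[-1]):
--             return "Valid"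
--         else:
--             return f"Invalid (Checksum does not match last digit. Expected {check_digit}, got {ean[-1]})"
--
--     return {ean: validate_ean(ean) for ean in ean_codes}
-- ===== SOURCE B (Python) =====
-- def validate_ean_codes(ean_codes):
--     WEIGHTS = [1, 3] * 6 + [1]
--
--     def validate_ean(ean):
--         if len(ean) != 13:
--             return "Invalid (Length is not equal to 13 characters)"
--         if not ean.isdigit():
--             return "Invalid (Contains non-digit characters)"
--         # EAN-13 is valid iff the weighted sum of ALL 13 digits is divisible by 10.
--         total = sum(int(d) * w for d, w in zip(ean, WEIGHTS))
--         if total % 10 == 0: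
--             return "Valid"
--         expected = (int(ean[-1]) - total) % 10
--         return f"Invalid (Checksum does not match last digit. Expected {expected}, got {ean[-1]})"
--
--     return {ean: validate_ean(ean) for ean in ean_codes}
-- ===== Notes on version B (the rewrite author's own statement) =====
-- stated objective: alternative
-- what changed: B validates via the standard divisibility characterisation: it zips all 13 digits with a precomputed weight table [1,3]*6+[1] and declares the code valid iff the full weighted sum is divisible by 10, computing the expected digit as (int(ean[-1]) - total) % 10 only for the error message, instead of A's two parity-strided index sums and compute-the-check-digit-then-compare.
import Mathlib
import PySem

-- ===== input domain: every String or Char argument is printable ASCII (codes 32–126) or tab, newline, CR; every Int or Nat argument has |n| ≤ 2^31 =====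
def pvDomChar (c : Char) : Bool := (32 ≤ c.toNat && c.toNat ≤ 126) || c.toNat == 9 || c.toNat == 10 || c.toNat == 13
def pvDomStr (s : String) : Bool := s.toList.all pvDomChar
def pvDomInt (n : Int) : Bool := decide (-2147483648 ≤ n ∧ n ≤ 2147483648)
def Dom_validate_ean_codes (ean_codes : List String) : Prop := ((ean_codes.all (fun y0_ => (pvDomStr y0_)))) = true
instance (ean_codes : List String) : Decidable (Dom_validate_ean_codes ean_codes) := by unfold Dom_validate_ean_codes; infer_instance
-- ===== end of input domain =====

-- B validates an EAN-13 by the divisibility characterisation — all 13 digits zipped with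
-- a weight table [1,3,...,1], valid iff 10 divides the total — instead of A's two
-- parity-strided sums and compute-then-compare check digit; objective: alternative.


-- ===== PORT A =====
-- int(c) for a one-character digit string; exact because it is only reached under the
-- isdigit guard (ASCII digits on the stated domain).
def pvDigit (c : Char) : Int := (c.toNat : Int) - 48

-- A's inner validate_ean: two parity sums over index ranges, then the checksum test.
-- pyGetD's default '0' is never used: indices 0..11 and -1 are in range once len = 13.
def pvValidateA (ean : String) : String :=
  if PySem.Str.len ean ≠ 13 then "Invalid (Length is not equal to 13 characters)"
  else if ¬ PySem.Str.strIsdigit ean then "Invalid (Contains non-digit characters)"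
  else
    let odds := ((PySem.List.pyRange 0 12 2).map
      (fun i => pvDigit (PySem.List.pyGetD ean.toList i '0'))).sum
    let evens := ((PySem.List.pyRange 1 12 2).map
      (fun i => pvDigit (PySem.List.pyGetD ean.toList i '0'))).sum
    let check_digit := PySem.Int.mod (10 - PySem.Int.mod (odds + evens * 3) 10) 10
    let last := PySem.List.pyGetD ean.toList (-1) '0'
    if check_digit = pvDigit last then "Valid"
    else "Invalid (Checksum does not match last digit. Expected " ++
      PySem.Int.toStr check_digit ++ ", got " ++ String.ofList [last] ++ ")"

def validate_ean_codes (ean_codes : List String) : List (String × String) :=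
  (ean_codes.foldl (fun d ean => d.insert ean (pvValidateA ean))
    (PySem.Dict.empty : PySem.Dict String String)).items

-- ===== PORT B =====
-- B's weight table [1, 3] * 6 + [1].
def pvWeights : List Int := [1, 3, 1, 3, 1, 3, 1, 3, 1, 3, 1, 3, 1]

-- B's inner validate_ean: zip all 13 digits with the weights, valid iff 10 ∣ total.
def pvValidateB (ean : String) : String :=
  if PySem.Str.len ean ≠ 13 then "Invalid (Length is not equal to 13 characters)"
  else if ¬ PySem.Str.strIsdigit ean then "Invalid (Contains non-digit characters)"
  else
    let total := ((ean.toList.zip pvWeights).map (fun p => pvDigit p.1 * p.2)).sum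
    if PySem.Int.mod total 10 = 0 then "Valid"
    else
      let last := PySem.List.pyGetD ean.toList (-1) '0'
      let expected := PySem.Int.mod (pvDigit last - total) 10
      "Invalid (Checksum does not match last digit. Expected " ++
        PySem.Int.toStr expected ++ ", got " ++ String.ofList [last] ++ ")"

def validate_ean_codes_alt (ean_codes : List String) : List (String × String) :=
  (ean_codes.foldl (fun d ean => d.insert ean (pvValidateB ean))
    (PySem.Dict.empty : PySem.Dict String String)).items

-- ===== PRECONDITION & SPEC =====
def Spec_validate_ean_codes (ean_codes : List String) (out : List (String × String)) : Prop := out = validate_ean_codes_alt ean_codes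
instance (ean_codes : List String) (out : List (String × String)) : Decidable (Spec_validate_ean_codes ean_codes out) := by unfold Spec_validate_ean_codes; infer_instance

-- ===== CLAIM (what is proved, stated in full; the proofs are below) =====
def Claim_equal_validate_ean_codes : Prop := ∀ (ean_codes : List String), Dom_validate_ean_codes ean_codes → Spec_validate_ean_codes ean_codes (validate_ean_codes ean_codes)

-- ===== LEMMAS AND PROOFS =====
lemma pvList13 (cs : List Char) (h : cs.length = 13) :
    ∃ a b c d e f g h' i j k l m, cs = [a, b, c, d, e, f, g, h', i, j, k, l, m] := by
  rcases cs with _ | ⟨a, cs⟩ <;> simp_all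
  rcases cs with _ | ⟨b, cs⟩ <;> simp_all
  rcases cs with _ | ⟨c, cs⟩ <;> simp_all
  rcases cs with _ | ⟨d, cs⟩ <;> simp_all
  rcases cs with _ | ⟨e, cs⟩ <;> simp_all
  rcases cs with _ | ⟨f, cs⟩ <;> simp_all
  rcases cs with _ | ⟨g, cs⟩ <;> simp_all
  rcases cs with _ | ⟨h', cs⟩ <;> simp_all
  rcases cs with _ | ⟨i, cs⟩ <;> simp_all
  rcases cs with _ | ⟨j, cs⟩ <;> simp_all
  rcases cs with _ | ⟨k, cs⟩ <;> simp_all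
  rcases cs with _ | ⟨l, cs⟩ <;> simp_all
  rcases cs with _ | ⟨m, cs⟩ <;> simp_all

lemma pvDigit_bounds (c : Char) (h : PySem.Chars.isdigit c = true) :
    0 ≤ pvDigit c ∧ pvDigit c ≤ 9 := by
  simp [PySem.Chars.isdigit] at h
  obtain ⟨h1, h2⟩ := h
  rw [Char.le_def] at h1 h2
  have a1 := UInt32.le_iff_toNat_le.mp h1
  have a2 := UInt32.le_iff_toNat_le.mp h2
  simp only [Char.toNat_val] at a1 a2
  have e0 : ('0' : Char).toNat = 48 := rfl
  have e9 : ('9' : Char).toNat = 57 := rfl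
  unfold pvDigit
  omega

-- The checksum arithmetic: for a last digit 0 ≤ dm ≤ 9 and first-12 weighted sum t,
-- A's "check digit equals last" is exactly B's "total divisible by 10", and A's check
-- digit equals B's expected value.
lemma pvChecksum (t dm : Int) (h0 : 0 ≤ dm) (h9 : dm ≤ 9) :
    ((PySem.Int.mod (10 - PySem.Int.mod t 10) 10 = dm) ↔ (PySem.Int.mod (t + dm) 10 = 0))
    ∧ PySem.Int.mod (10 - PySem.Int.mod t 10) 10 = PySem.Int.mod (dm - (t + dm)) 10 := by
  simp only [PySem.Int.mod_eq_emod_of_pos (show (0:Int) < 10 by norm_num)]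
  constructor
  · constructor <;> (intro hh; omega)
  · omega

-- The whole checksum branch of A equals that of B, as a function of the common
-- weighted sum t of the first 12 digits and the last digit.
lemma pvBranch_eq (t : Int) (last : Char) (h0 : 0 ≤ pvDigit last) (h9 : pvDigit last ≤ 9) :
    (if PySem.Int.mod (10 - PySem.Int.mod t 10) 10 = pvDigit last then "Valid"
     else "Invalid (Checksum does not match last digit. Expected " ++
       PySem.Int.toStr (PySem.Int.mod (10 - PySem.Int.mod t 10) 10) ++ ", got " ++
       String.ofList [last] ++ ")")
    = (if PySem.Int.mod (t + pvDigit last) 10 = 0 then "Valid"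
       else "Invalid (Checksum does not match last digit. Expected " ++
         PySem.Int.toStr (PySem.Int.mod (pvDigit last - (t + pvDigit last)) 10) ++ ", got " ++
         String.ofList [last] ++ ")") := by
  obtain ⟨hiff, hexp⟩ := pvChecksum t (pvDigit last) h0 h9
  by_cases hc : PySem.Int.mod (t + pvDigit last) 10 = 0
  · rw [if_pos (hiff.mpr hc), if_pos hc]
  · rw [if_neg (fun hx => hc (hiff.mp hx)), if_neg hc, hexp]

lemma pvValidate_eq (ean : String) : pvValidateA ean = pvValidateB ean := by
  unfold pvValidateA pvValidateB
  by_cases h1 : PySem.Str.len ean ≠ 13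
  · rw [if_pos h1, if_pos h1]
  · rw [if_neg h1, if_neg h1]
    by_cases h2 : ¬ PySem.Str.strIsdigit ean
    · rw [if_pos h2, if_pos h2]
    · rw [if_neg h2, if_neg h2]
      have h13 : ean.toList.length = 13 := by
        have := PySem.Str.len_eq ean
        omega
      obtain ⟨a, b, c, d, e, f, g, hh, ii, j, k, l, m, hcs⟩ := pvList13 _ h13
      have hdig : PySem.Chars.isdigit m = true := by
        rw [not_not] at h2
        rw [PySem.Str.strIsdigit_eq, hcs] at h2
        simp [PySem.Chars.strIsdigit] at h2
        tauto
      obtain ⟨hm0, hm9⟩ := pvDigit_bounds m hdig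
      have hr0 : PySem.List.pyRange 0 12 2 = [0, 2, 4, 6, 8, 10] := by decide
      have hr1 : PySem.List.pyRange 1 12 2 = [1, 3, 5, 7, 9, 11] := by decide
      have hlast : PySem.List.pyGetD ean.toList (-1) '0' = m := by
        rw [hcs]
        simp [PySem.List.pyGetD, PySem.List.pyGet?, PySem.List.pyIdx?]
      have hsum : ((ean.toList.zip pvWeights).map (fun p => pvDigit p.1 * p.2)).sum
          = ((PySem.List.pyRange 0 12 2).map
              (fun i => pvDigit (PySem.List.pyGetD ean.toList i '0'))).sum
            + ((PySem.List.pyRange 1 12 2).map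
              (fun i => pvDigit (PySem.List.pyGetD ean.toList i '0'))).sum * 3
            + pvDigit m := by
        rw [hcs, hr0, hr1]
        simp [pvWeights, PySem.List.pyGetD, PySem.List.pyGet?, PySem.List.pyIdx?]
        ring
      simp only [hsum, hlast]
      exact pvBranch_eq _ m hm0 hm9

-- ===== VERDICT (by name: the statement is the Claim_ definition above) =====
theorem validate_ean_codes_spec : Claim_equal_validate_ean_codes := by
  intro ean_codes _
  unfold Spec_validate_ean_codes validate_ean_codes validate_ean_codes_alt
  simp only [pvValidate_eq]
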